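-- pv_equiv track=rewrite | github.com/digikashi/question-generater | my_math_app/problem_generater.py | is_cumulative_sum_valid
-- ===== SOURCE A (Python) =====
-- def has_duplicate_absolute_values(calc_sequence):
--     # 数列の絶対値に重複があるかを判定
--     absolute_values = [abs(x) for x in calc_sequence]
--     return len(absolute_values) != len(set(absolute_values))
--
-- def is_cumulative_sum_valid(calc_sequence, num_digits):
--     # 累積和が指定範囲内に収まっているかを検証
--     min_sum = 10 ** (num_digits - 1)
--     max_sum = (10 ** (num_digits + 1)) - 1
--     if has_duplicate_absolute_values(calc_sequence):
--         return False, 0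
--     current_sum = 0
--     for x in calc_sequence:
--         current_sum += x
--         if not (min_sum <= current_sum <= max_sum):
--             return False, current_sum
--     return True, current_sum
-- ===== SOURCE B (Python) =====
-- def is_cumulative_sum_valid(calc_sequence, num_digits):
--     min_sum = 10 ** (num_digits - 1)
--     max_sum = (10 ** (num_digits + 1)) - 1
--     # duplicate |values|: sort, then look for an equal adjacent pair
--     abs_sorted = sorted(abs(x) for x in calc_sequence)
--     if any(a == b for a, b in zip(abs_sorted, abs_sorted[1:])):
--         return False, 0
--     # build the whole prefix-sum table first, then scan it
--     prefix = []
--     s = 0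
--     for x in calc_sequence:
--         s += x
--         prefix.append(s)
--     for s in prefix:
--         if not (min_sum <= s <= max_sum):
--             return False, s
--     return True, (prefix[-1] if prefix else 0)
-- ===== Notes on version B (the rewrite author's own statement) =====
-- stated objective: alternative
-- what changed: A fuses everything into one incremental loop with a len-vs-set duplicate test; B detects duplicate absolute values by sorting and comparing adjacent elements, then builds the full prefix-sum table in a separate pass and scans that table for the first out-of-range entry.
import Mathlib
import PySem

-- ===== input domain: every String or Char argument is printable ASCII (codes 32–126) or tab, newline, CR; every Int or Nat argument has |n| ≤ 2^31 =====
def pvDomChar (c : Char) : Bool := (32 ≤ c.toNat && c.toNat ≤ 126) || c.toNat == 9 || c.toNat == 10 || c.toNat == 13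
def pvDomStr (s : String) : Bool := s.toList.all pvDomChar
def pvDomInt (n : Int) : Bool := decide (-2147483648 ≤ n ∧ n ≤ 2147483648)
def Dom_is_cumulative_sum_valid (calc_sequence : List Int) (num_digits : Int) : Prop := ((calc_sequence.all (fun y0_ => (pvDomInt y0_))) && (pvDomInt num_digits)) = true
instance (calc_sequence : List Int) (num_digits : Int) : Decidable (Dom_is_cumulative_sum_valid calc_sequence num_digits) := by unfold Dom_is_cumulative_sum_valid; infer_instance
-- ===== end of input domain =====

-- B replaces A's fused incremental loop by a sort-and-compare-adjacent duplicate check plus a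
-- separately built prefix-sum table that is then scanned (alternative decomposition, same results).
-- ===== SHARED BOUND HELPERS (both Pythons compute min_sum/max_sum by the same two expressions) =====
-- Exact integer model of Python's `10 ** e` and its mixed int/float comparisons:
-- for e ≥ 0 the power is an exact int; for e < 0 Python yields the float 10.0**e, which lies in
-- (0, 0.1] (so `min_sum <= s` for an int s means s ≥ 1) except that it underflows to 0.0 exactly
-- when e ≤ -324 (then s ≥ 0); on the max side, for num_digits ≤ -2 the float max_sum = 10.0**e - 1
-- lies in [-1, 0), so `s <= max_sum` for an int s means s ≤ -1.  Verified against CPython.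
def pvMinSum (num_digits : Int) : Int :=
  if 1 ≤ num_digits then 10 ^ (num_digits - 1).toNat
  else if -322 ≤ num_digits then 1 else 0

def pvMaxSum (num_digits : Int) : Int :=
  if -1 ≤ num_digits then 10 ^ (num_digits + 1).toNat - 1 else -1

-- ===== PORT A =====
def pvHasDupAbsA (calc_sequence : List Int) : Bool :=
  let absolute_values := calc_sequence.map (fun x => |x|)
  decide (absolute_values.length ≠ (PySem.Set.ofList absolute_values).length)

def pvLoopA (min_sum max_sum : Int) : List Int → Int → Bool × Int
  | [], current_sum => (true, current_sum)
  | x :: rest, current_sum =>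
    let cs := current_sum + x
    if ¬ (min_sum ≤ cs ∧ cs ≤ max_sum) then (false, cs) else pvLoopA min_sum max_sum rest cs

def is_cumulative_sum_valid (calc_sequence : List Int) (num_digits : Int) : Bool × Int :=
  let min_sum := pvMinSum num_digits
  let max_sum := pvMaxSum num_digits
  if pvHasDupAbsA calc_sequence then (false, 0)
  else pvLoopA min_sum max_sum calc_sequence 0

-- ===== PORT B =====
-- any(a == b for a, b in zip(l, l[1:]))
def pvHasAdjDup : List Int → Bool
  | [] => false
  | [_] => false
  | a :: b :: rest => a == b || pvHasAdjDup (b :: rest)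

-- the prefix-sum table built by B's first loop
def pvPrefix (s : Int) : List Int → List Int
  | [] => []
  | x :: xs => (s + x) :: pvPrefix (s + x) xs

-- B's second loop: first table entry outside [min_sum, max_sum], if any
def pvFirstBad (min_sum max_sum : Int) : List Int → Option Int
  | [] => none
  | s :: rest => if ¬ (min_sum ≤ s ∧ s ≤ max_sum) then some s else pvFirstBad min_sum max_sum rest

def is_cumulative_sum_valid_alt (calc_sequence : List Int) (num_digits : Int) : Bool × Int :=
  let min_sum := pvMinSum num_digits
  let max_sum := pvMaxSum num_digits
  let abs_sorted := PySem.List.sorted (calc_sequence.map (fun x => |x|)) (fun v => v) false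
  if pvHasAdjDup abs_sorted then (false, 0)
  else
    let prefixTable := pvPrefix 0 calc_sequence
    match pvFirstBad min_sum max_sum prefixTable with
    | some s => (false, s)
    | none => (true, prefixTable.getLast?.getD 0)

-- ===== PRECONDITION & SPEC =====
def Spec_is_cumulative_sum_valid (calc_sequence : List Int) (num_digits : Int) (out : Bool × Int) : Prop := out = is_cumulative_sum_valid_alt calc_sequence num_digits
instance (calc_sequence : List Int) (num_digits : Int) (out : Bool × Int) : Decidable (Spec_is_cumulative_sum_valid calc_sequence num_digits out) := by unfold Spec_is_cumulative_sum_valid; infer_instance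

-- ===== CLAIM (what is proved, stated in full; the proofs are below) =====
def Claim_equal_is_cumulative_sum_valid : Prop := ∀ (calc_sequence : List Int) (num_digits : Int), Dom_is_cumulative_sum_valid calc_sequence num_digits → Spec_is_cumulative_sum_valid calc_sequence num_digits (is_cumulative_sum_valid calc_sequence num_digits)

-- ===== LEMMAS AND PROOFS =====

theorem pvHasAdjDup_sorted_iff (ys : List Int) (h : ys.Pairwise (· ≤ ·)) :
    pvHasAdjDup ys = true ↔ ¬ ys.Nodup := by
  induction ys with
  | nil => simp [pvHasAdjDup]
  | cons a t ih =>
    cases t with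
    | nil => simp [pvHasAdjDup]
    | cons b r =>
      rcases List.pairwise_cons.mp h with ⟨hab, ht⟩
      have hrec := ih ht
      simp only [pvHasAdjDup, Bool.or_eq_true, beq_iff_eq, hrec, List.nodup_cons]
      constructor
      · rintro (rfl | hdup)
        · intro hc; exact hc.1 (by simp)
        · intro hc; exact hdup hc.2
      · intro hc
        by_cases hab' : a = b
        · exact Or.inl hab'
        · right
          intro hnd
          apply hc
          refine ⟨?_, hnd⟩
          intro hmem
          rcases List.mem_cons.mp hmem with rfl | hmr
          · exact hab' rfl
          · have h1 : a ≤ b := hab b (by simp)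
            have h2 : b ≤ a := (List.pairwise_cons.mp ht).1 a hmr
            exact hab' (le_antisymm h1 h2)

theorem pvLen_ofList_eq_iff (xs : List Int) :
    (PySem.Set.ofList xs).length = xs.length ↔ xs.Nodup := by
  constructor
  · intro h
    have hnd : (PySem.Set.ofList xs).Nodup := PySem.Set.nodup_ofList xs
    have hts : (PySem.Set.ofList xs).toFinset = xs.toFinset := by
      ext a; simp [List.mem_toFinset, PySem.Set.mem_ofList]
    have h1 : (PySem.Set.ofList xs).toFinset.card = (PySem.Set.ofList xs).length :=
      List.toFinset_card_of_nodup hnd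
    have h2 : xs.toFinset.card = xs.dedup.length := List.card_toFinset xs
    have h3 : xs.dedup.length = xs.length := by rw [← h2, ← hts, h1, h]
    have h4 : xs.dedup = xs := (List.dedup_sublist xs).eq_of_length h3
    rw [← h4]; exact List.nodup_dedup xs
  · intro h
    rw [PySem.Set.ofList_eq_self_of_nodup xs h]

theorem pvDupTests_agree (xs : List Int) :
    pvHasDupAbsA xs =
      pvHasAdjDup (PySem.List.sorted (xs.map (fun x => |x|)) (fun v => v) false) := by
  set ys := xs.map (fun x => |x|) with hys
  have hperm : (PySem.List.sorted ys (fun v => v) false).Perm ys := PySem.List.sorted_perm ys (fun v => v) false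
  have hpw : (PySem.List.sorted ys (fun v => v) false).Pairwise (· ≤ ·) := by
    simpa using PySem.List.sorted_pairwise (xs := ys) (key := fun v => v)
  have h1 := pvHasAdjDup_sorted_iff _ hpw
  have h2 : (PySem.List.sorted ys (fun v => v) false).Nodup ↔ ys.Nodup := hperm.nodup_iff
  have h3 : pvHasDupAbsA xs = true ↔ ¬ ys.Nodup := by
    simp only [pvHasDupAbsA, decide_eq_true_eq, ← hys]
    rw [← pvLen_ofList_eq_iff ys]
    omega
  exact Bool.eq_iff_iff.mpr (h3.trans (h1.trans (not_congr h2)).symm)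

-- loop ↔ table-scan equivalence
theorem pvLoop_eq_scan (lo hi : Int) (xs : List Int) (cs : Int) :
    pvLoopA lo hi xs cs =
      (match pvFirstBad lo hi (pvPrefix cs xs) with
       | some s => (false, s)
       | none => (true, (pvPrefix cs xs).getLast?.getD cs)) := by
  induction xs generalizing cs with
  | nil => simp [pvLoopA, pvPrefix, pvFirstBad]
  | cons x rest ih =>
    simp only [pvLoopA, pvPrefix, pvFirstBad]
    by_cases hb : ¬ (lo ≤ cs + x ∧ cs + x ≤ hi)
    · simp [hb]
    · simp only [hb, if_false]
      rw [ih (cs + x)]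
      cases hfb : pvFirstBad lo hi (pvPrefix (cs + x) rest) with
      | some s => simp
      | none =>
        simp only
        congr 1
        cases hpre : pvPrefix (cs + x) rest with
        | nil => simp
        | cons p ps =>
          cases hgl : (p :: ps).getLast? with
          | none => simp at hgl
          | some v => simp [hgl]

-- ===== VERDICT (by name: the statement is the Claim_ definition above) =====
theorem is_cumulative_sum_valid_spec : Claim_equal_is_cumulative_sum_valid := by
  intro xs nd _
  unfold Spec_is_cumulative_sum_valid
  unfold is_cumulative_sum_valid is_cumulative_sum_valid_alt
  rw [pvDupTests_agree xs]
  by_cases hd : pvHasAdjDup (PySem.List.sorted (xs.map (fun x => |x|)) (fun v => v) false)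
  · simp [hd]
  · simp only [hd, Bool.false_eq_true, if_false]
    simpa using pvLoop_eq_scan (pvMinSum nd) (pvMaxSum nd) xs 0
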